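-- pv_equiv track=rewrite | github.com/OpenMDAO/OpenMDAO-Framework | openmdao.lib/src/openmdao/lib/components/nastran/nastran_maker.py | _items_to_long_form
-- ===== SOURCE A (Python) =====
-- def _items_to_long_form(items, unique_int):
--         # make sure name is in long form
--         if "*" not in items[0]:
--             items[0] = items[0].strip() + "*"
--
--         while len(items):
--             if items[-1] == "":
--                 del items[-1]
--             else: break
--
--         # insert some continuations
--         divisions = 4
--         index = 1
--         while index < len(items)-divisions:
--             index += divisions
--             continuation = "*" + str(unique_int)
--             unique_int += 1
--             items.insert(index, continuation)
--             items.insert(index, continuation)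
--             index += 2
--
--         final = []
--         current_row = -1
--         for index, item in enumerate(items):
--             if index % 6 == 0:
--                 final.append(item.ljust(8))
--                 current_row += 1
--             else:
--                 final[-1] += item.ljust(16)
--
--         return unique_int, final
-- ===== SOURCE B (Python) =====
-- def _items_to_long_form(items, unique_int):
--     # NOTE: return-value equivalence only; A mutates `items` in place, B does not.
--     head = items[0] if "*" in items[0] else items[0].strip() + "*"
--     body = [head] + items[1:]
--     while body[-1] == "":
--         body.pop()
--     leader = body[0]
--     fields = body[1:]
--     final = []
--     i = 0
--     while True:
--         row = leader.ljust(8) + "".join(f.ljust(16) for f in fields[i:i+4])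
--         i += 4
--         if i < len(fields):
--             marker = "*" + str(unique_int)
--             unique_int += 1
--             row += marker.ljust(16)
--             leader = marker
--             final.append(row)
--         else:
--             final.append(row)
--             break
--     return unique_int, final
-- ===== Notes on version B (the rewrite author's own statement) =====
-- stated objective: faster
-- what changed: B replaces A's quadratic pipeline of in-place list.insert continuation splicing followed by an enumerate-mod-6 reassembly pass with a single streaming loop that emits one finished row per chunk of four fields, appending the continuation marker arithmetically instead of inserting it into the list.
-- outside the precondition, e.g. on _items_to_long_form([], 0): A raises IndexError, B raises IndexError
import Mathlib
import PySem

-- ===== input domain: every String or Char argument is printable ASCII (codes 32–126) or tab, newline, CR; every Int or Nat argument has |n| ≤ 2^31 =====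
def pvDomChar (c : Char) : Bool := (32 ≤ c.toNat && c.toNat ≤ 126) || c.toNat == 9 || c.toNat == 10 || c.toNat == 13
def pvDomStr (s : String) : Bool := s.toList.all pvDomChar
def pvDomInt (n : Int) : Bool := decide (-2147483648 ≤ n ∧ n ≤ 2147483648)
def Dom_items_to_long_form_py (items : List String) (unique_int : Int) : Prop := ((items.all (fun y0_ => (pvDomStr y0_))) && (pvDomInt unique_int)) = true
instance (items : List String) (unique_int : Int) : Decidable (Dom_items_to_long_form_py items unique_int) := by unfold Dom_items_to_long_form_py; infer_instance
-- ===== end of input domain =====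

-- B replaces A's quadratic in-place list inserts and index arithmetic by one streaming pass
-- over chunks of four fields (objective: faster; return-value equivalence only — A mutates `items` in place, B does not).

-- shared helper: s.ljust(w) (exact for any string: len = code points)
def pvLjust (s : String) (w : Nat) : String := String.mk (s.toList ++ List.replicate (w - s.toList.length) ' ')

-- shared helper: the `while …: del items[-1] / pop()` trailing-blank loop of both programs
def pvStripTrail (items : List String) : List String :=
  if hne : items = [] then items
  else if PySem.List.pyGet? items (-1) = some "" then pvStripTrail items.dropLast else items
termination_by items.length
decreasing_by
  have : 0 < items.length := List.length_pos_iff.mpr hne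
  simp [List.length_dropLast]
  omega

-- ===== PORT A =====
-- the `while index < len(items)-divisions` insertion loop (index stays ≥ 1, kept as Nat)
def pvInsLoop (items : List String) (u : Int) (index : Nat) : List String × Int :=
  if (index : Int) < (items.length : Int) - 4 then
    let index' := index + 4
    let c := "*" ++ PySem.Int.toStr u
    let items' := PySem.List.insert (PySem.List.insert items (index' : Int) c) (index' : Int) c
    pvInsLoop items' (u + 1) (index' + 2)
  else (items, u)
termination_by items.length - index
decreasing_by
  simp [PySem.List.length_insert]
  omega

-- final[-1] += s  (the loop only reaches this with final nonempty; [] case is unreachable filler)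
def pvAppendLast : List String → String → List String
  | [], _ => []
  | [x], s => [x ++ s]
  | x :: y :: rest, s => x :: pvAppendLast (y :: rest) s

-- the `for index, item in enumerate(items)` formatting loop
def pvBuildFinal (items : List String) : List String :=
  (PySem.List.enumerate items 0).foldl
    (fun final p =>
      if PySem.Int.mod p.1 6 = 0 then final ++ [pvLjust p.2 8]
      else pvAppendLast final (pvLjust p.2 16)) []

def items_to_long_form_py (items : List String) (unique_int : Int) : Int × List String :=
  match items with
  | [] => (unique_int, [])   -- Python raises IndexError here (items[0]); excluded by Pre_
  | x :: rest =>
    let items1 := (if PySem.Str.isIn "*" x then x else PySem.Str.strip x ++ "*") :: rest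
    let items2 := pvStripTrail items1
    let r := pvInsLoop items2 unique_int 1
    (r.2, pvBuildFinal r.1)

-- ===== PORT B =====
-- Source B's streaming loop: one row per chunk of four fields, marker appended iff fields remain
def pvRowsB (leader : String) (fields : List String) (u : Int) : Int × List String :=
  let row := pvLjust leader 8 ++ String.join ((fields.take 4).map (fun f => pvLjust f 16))
  if 4 < fields.length then
    let marker := "*" ++ PySem.Int.toStr u
    let r := pvRowsB marker (fields.drop 4) (u + 1)
    (r.1, (row ++ pvLjust marker 16) :: r.2)
  else (u, [row])
termination_by fields.length
decreasing_by simp [List.length_drop]; omega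

def items_to_long_form_py_alt (items : List String) (unique_int : Int) : Int × List String :=
  match items with
  | [] => (unique_int, [])   -- Python raises IndexError here (items[0]); excluded by Pre_
  | x :: rest =>
    let head := if PySem.Str.isIn "*" x then x else PySem.Str.strip x ++ "*"
    match pvStripTrail (head :: rest) with
    | [] => (unique_int, [])   -- unreachable: head is never ""
    | leader :: fields => pvRowsB leader fields unique_int

-- ===== PRECONDITION & SPEC =====
-- Pre_ excludes only the empty list, on which the Python A raises IndexError at items[0].
def Pre_items_to_long_form_py (items : List String) (unique_int : Int) : Prop := items ≠ []
instance (items : List String) (unique_int : Int) : Decidable (Pre_items_to_long_form_py items unique_int) := by unfold Pre_items_to_long_form_py; infer_instance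

def pvWitness_items_to_long_form_py : List String × Int := (["GRID", "1", "2", "3", "4", "5"], 7)

def Spec_items_to_long_form_py (items : List String) (unique_int : Int) (out : Int × List String) : Prop := out = items_to_long_form_py_alt items unique_int
instance (items : List String) (unique_int : Int) (out : Int × List String) : Decidable (Spec_items_to_long_form_py items unique_int out) := by unfold Spec_items_to_long_form_py; infer_instance

-- ===== CLAIM (what is proved, stated in full; the proofs are below) =====
def Claim_equal_items_to_long_form_py : Prop := ∀ (items : List String) (unique_int : Int), Dom_items_to_long_form_py items unique_int → Pre_items_to_long_form_py items unique_int → Spec_items_to_long_form_py items unique_int (items_to_long_form_py items unique_int)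

-- ===== LEMMAS AND PROOFS =====

-- the shape of A's list after the insertion loop: each residual block of fields is
-- preceded by a doubled continuation marker
def gA (R : List String) (u : Int) : List String × Int :=
  if h : R = [] then ([], u)
  else
    let c := "*" ++ PySem.Int.toStr u
    let r := gA (R.drop 4) (u + 1)
    (c :: c :: (R.take 4 ++ r.1), r.2)
termination_by R.length
decreasing_by
  have : 0 < R.length := List.length_pos_iff.mpr h
  simp [List.length_drop]; omega

-- A's formatting step as a named function (the lambda inside pvBuildFinal)
def pvStep : List String → Int × String → List String :=
  fun final p =>
    if PySem.Int.mod p.1 6 = 0 then final ++ [pvLjust p.2 8]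
    else pvAppendLast final (pvLjust p.2 16)

theorem gA_nil (u : Int) : gA [] u = ([], u) := by
  rw [gA]
  simp

theorem buildFinal_eq_foldl (items : List String) :
    pvBuildFinal items = (PySem.List.enumerate items 0).foldl pvStep [] := rfl

theorem mod6_ne_zero (k r : Nat) (h1 : 0 < r) (h2 : r < 6) :
    PySem.Int.mod (6*(k:Int)+r) 6 ≠ 0 := by
  unfold PySem.Int.mod
  rw [Int.fmod_eq_emod]
  simp
  omega

theorem appendLast_append (acc : List String) (x s : String) :
    pvAppendLast (acc ++ [x]) s = acc ++ [x ++ s] := by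
  induction acc with
  | nil => rfl
  | cons a t ih => cases t <;> simp_all [pvAppendLast]

theorem strFoldl_append (l : List String) (x a : String) :
    List.foldl (fun r s => r ++ s) (x ++ a) l = x ++ List.foldl (fun r s => r ++ s) a l := by
  induction l generalizing a with
  | nil => rfl
  | cons b t ih => simp only [List.foldl_cons, String.append_assoc, ih]

theorem strJoin_cons (s : String) (l : List String) :
    String.join (s :: l) = s ++ String.join l := by
  show List.foldl (fun r s => r ++ s) ("" ++ s) l = s ++ List.foldl (fun r s => r ++ s) "" l
  rw [String.empty_append]
  have := strFoldl_append l s ""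
  rwa [String.append_empty] at this

theorem strJoin_append_singleton (l : List String) (a : String) :
    String.join (l ++ [a]) = String.join l ++ a := by
  show List.foldl (fun r s => r ++ s) "" (l ++ [a]) = _
  rw [List.foldl_append]
  rfl

-- the inner fold across the ≤ 5 non-boundary positions of a row
theorem fold_inner (xs : List String) (k r : Nat) (acc : List String) (x : String)
    (h1 : 0 < r) (h2 : r + xs.length ≤ 6) :
    (PySem.List.enumerate xs (6*(k:Int)+r)).foldl pvStep (acc ++ [x])
      = acc ++ [x ++ String.join (xs.map (fun f => pvLjust f 16))] := by
  induction xs generalizing r acc x with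
  | nil => simp [PySem.List.enumerate, String.append_empty, String.join]
  | cons y ys ih =>
    rw [PySem.List.enumerate_cons, List.foldl_cons]
    have hr6 : r < 6 := by simp at h2; omega
    have hne := mod6_ne_zero k r h1 hr6
    simp only [pvStep]
    rw [if_neg hne, appendLast_append]
    rw [show (6*(k:Int)+r+1) = 6*(k:Int)+((r+1 : Nat) : Int) by push_cast; ring]
    rw [ih (r+1) acc (x ++ pvLjust y 16) (by omega) (by simp at h2 ⊢; omega)]
    simp [strJoin_cons, String.append_assoc]

-- the insertion loop, characterised: it appends gA of the residue after the prefix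
theorem insLoop_spec (R P : List String) (u : Int) (n : Nat) (hP : P.length = n + 4) :
    pvInsLoop (P ++ R) u n = (P ++ (gA R u).1, (gA R u).2) := by
  rw [pvInsLoop, gA]
  by_cases hR : R = []
  · subst hR
    simp [hP]
  · have hRlen : 0 < R.length := List.length_pos_iff.mpr hR
    rw [dif_neg hR]
    rw [if_pos (by simp [hP]; omega)]
    dsimp only
    have hcut : PySem.List.insert (P ++ R) ((n+4 : Nat) : Int) ("*" ++ PySem.Int.toStr u)
        = P ++ ("*" ++ PySem.Int.toStr u) :: R := by
      rw [show ((n+4 : Nat) : Int) = ((P.length : Nat) : Int) by simp [hP]]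
      rw [PySem.List.insert_natCast _ _ _ (by simp)]
      simp
    rw [hcut]
    have hcut2 : PySem.List.insert (P ++ ("*" ++ PySem.Int.toStr u) :: R) ((n+4 : Nat) : Int)
        ("*" ++ PySem.Int.toStr u)
        = P ++ ("*" ++ PySem.Int.toStr u) :: ("*" ++ PySem.Int.toStr u) :: R := by
      rw [show ((n+4 : Nat) : Int) = ((P.length : Nat) : Int) by simp [hP]]
      rw [PySem.List.insert_natCast _ _ _ (by simp)]
      simp
    rw [hcut2]
    by_cases h4 : 4 ≤ R.length
    · have hsplit : P ++ ("*" ++ PySem.Int.toStr u) :: ("*" ++ PySem.Int.toStr u) :: R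
          = (P ++ ("*" ++ PySem.Int.toStr u) :: ("*" ++ PySem.Int.toStr u) :: R.take 4) ++ R.drop 4 := by
        simp [List.take_append_drop]
      rw [hsplit, insLoop_spec (R.drop 4) _ (u+1) (n+4+2)
        (by simp [hP, List.length_take]; omega)]
      simp
    · have hdrop : R.drop 4 = [] := List.drop_eq_nil_of_le (by omega)
      have htake : R.take 4 = R := List.take_of_length_le (by omega)
      rw [pvInsLoop]
      rw [if_neg (by simp; omega)]
      rw [gA]
      simp [hdrop, htake]
termination_by R.length
decreasing_by simp [List.length_drop]; omega

theorem insLoop_top (t : List String) (h : String) (u : Int) :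
    pvInsLoop (h :: t) u 1
      = (h :: (t.take 4 ++ (gA (t.drop 4) u).1), (gA (t.drop 4) u).2) := by
  by_cases h4 : 4 ≤ t.length
  · have : h :: t = (h :: t.take 4) ++ t.drop 4 := by simp [List.take_append_drop]
    rw [this, insLoop_spec (t.drop 4) (h :: t.take 4) u 1 (by simp [List.length_take]; omega)]
    simp
  · have hdrop : t.drop 4 = [] := List.drop_eq_nil_of_le (by omega)
    have htake : t.take 4 = t := List.take_of_length_le (by omega)
    rw [pvInsLoop]
    rw [if_neg (by simp; omega)]
    rw [gA]
    simp [hdrop, htake]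

theorem rowsB_fst (fields : List String) (leader : String) (u : Int) :
    (pvRowsB leader fields u).1 = (gA (fields.drop 4) u).2 := by
  rw [pvRowsB]
  by_cases h4 : 4 < fields.length
  · rw [if_pos h4]
    have hne : fields.drop 4 ≠ [] := by
      intro hnil
      have := congrArg List.length hnil
      simp at this; omega
    rw [gA, dif_neg hne]
    exact rowsB_fst (fields.drop 4) _ (u+1)
  · rw [if_neg h4]
    have hdrop : fields.drop 4 = [] := List.drop_eq_nil_of_le (by omega)
    rw [hdrop, gA]
    simp
termination_by fields.length
decreasing_by simp [List.length_drop]; omega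

theorem fold_rows (fields : List String) (leader : String) (u : Int) (k : Nat) (acc : List String) :
    (PySem.List.enumerate (leader :: (fields.take 4 ++ (gA (fields.drop 4) u).1)) (6*(k:Int))).foldl
        pvStep acc
      = acc ++ (pvRowsB leader fields u).2 := by
  rw [pvRowsB]
  rw [PySem.List.enumerate_cons, List.foldl_cons]
  rw [show pvStep acc (6*(k:Int), leader) = acc ++ [pvLjust leader 8] by
    simp [pvStep]]
  by_cases h4 : 4 < fields.length
  · rw [if_pos h4]
    have hne : fields.drop 4 ≠ [] := by
      intro hnil; have := congrArg List.length hnil; simp at this; omega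
    rw [gA, dif_neg hne]
    have hlen4 : (fields.take 4).length = 4 := by simp [List.length_take]; omega
    set c := "*" ++ PySem.Int.toStr u with hc
    set tail := (gA ((fields.drop 4).drop 4) (u+1)).1 with htail
    have hshape : fields.take 4 ++ (c :: c :: ((fields.drop 4).take 4 ++ tail))
        = (fields.take 4 ++ [c]) ++ (c :: ((fields.drop 4).take 4 ++ tail)) := by simp
    rw [hshape, PySem.List.enumerate_append, List.foldl_append]
    have h5 : ((fields.take 4 ++ [c]).length : Int) = 5 := by simp [hlen4]
    rw [show (6*(k:Int)+1) = 6*(k:Int)+((1:Nat):Int) by norm_num]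
    rw [fold_inner (fields.take 4 ++ [c]) k 1 acc (pvLjust leader 8) (by omega)
      (by simp [hlen4])]
    rw [show (6*(k:Int)+((1:Nat):Int)+((fields.take 4 ++ [c]).length : Int)) = 6*(((k+1:Nat)):Int) by
      rw [h5]; push_cast; ring]
    simp only [List.map_append, List.map_cons, List.map_nil]
    rw [strJoin_append_singleton]
    rw [show acc ++ [pvLjust leader 8 ++ (String.join ((fields.take 4).map fun f => pvLjust f 16) ++ pvLjust c 16)]
        = (acc ++ [(pvLjust leader 8 ++ String.join ((fields.take 4).map fun f => pvLjust f 16)) ++ pvLjust c 16]) by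
      simp [String.append_assoc]]
    rw [fold_rows (fields.drop 4) c (u+1) (k+1) _]
    simp
  · rw [if_neg h4]
    have hdrop : fields.drop 4 = [] := List.drop_eq_nil_of_le (by omega)
    have htake : fields.take 4 = fields := List.take_of_length_le (by omega)
    rw [hdrop, gA_nil]
    rw [List.append_nil]
    rw [htake]
    rw [show (6*(k:Int)+1) = 6*(k:Int)+((1:Nat):Int) by norm_num]
    rw [fold_inner fields k 1 acc (pvLjust leader 8) (by omega) (by omega)]
termination_by fields.length
decreasing_by simp [List.length_drop]; omega

theorem stripTrail_cons (rest : List String) (h : String) (hne : h ≠ "") :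
    ∃ t, pvStripTrail (h :: rest) = h :: t := by
  rw [pvStripTrail]
  rw [dif_neg (by simp)]
  by_cases hlast : PySem.List.pyGet? (h :: rest) (-1) = some ""
  · rw [if_pos hlast]
    cases rest with
    | nil =>
      rw [PySem.List.pyGet?_neg_one] at hlast
      simp at hlast
      exact absurd hlast hne
    | cons b r' =>
      have : (h :: b :: r').dropLast = h :: (b :: r').dropLast := by simp
      rw [this]
      exact stripTrail_cons ((b :: r').dropLast) h hne
  · rw [if_neg hlast]
    exact ⟨rest, rfl⟩
termination_by rest.length
decreasing_by simp [List.length_dropLast]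

theorem head_ne (x : String) :
    (if PySem.Str.isIn "*" x then x else PySem.Str.strip x ++ "*") ≠ "" := by
  split_ifs with hin
  · intro hx
    subst hx
    rw [PySem.Str.isIn_iff_infix] at hin
    simp at hin
  · intro he
    have := congrArg String.toList he
    simp at this

-- ===== VERDICT (by name: the statement is the Claim_ definition above) =====
theorem items_to_long_form_py_spec : Claim_equal_items_to_long_form_py := by
  intro items u _ hP
  unfold Spec_items_to_long_form_py
  cases items with
  | nil => exact absurd rfl hP
  | cons x rest =>
    show items_to_long_form_py (x :: rest) u = items_to_long_form_py_alt (x :: rest) u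
    simp only [items_to_long_form_py, items_to_long_form_py_alt]
    obtain ⟨t, ht⟩ := stripTrail_cons rest _ (head_ne x)
    rw [ht]
    rw [insLoop_top]
    rw [buildFinal_eq_foldl]
    rw [show (0 : Int) = 6*((0:Nat):Int) by norm_num]
    rw [fold_rows t _ u 0 []]
    rw [List.nil_append]
    exact Prod.ext ((rowsB_fst t _ u).symm) rfl
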